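-- pv_equiv track=rewrite | github.com/Dadarzz2405/AI-Agent | Agent.py | _repair_invalid_json_escapes
-- ===== SOURCE A (Python) =====
-- def _repair_invalid_json_escapes(json_str: str) -> str:
--     valid_escapes = {'"', "\\", "/", "b", "f", "n", "r", "t", "u"}
--     out = []
--     in_string = False
--     i = 0
--     while i < len(json_str):
--         ch = json_str[i]
--         if ch == '"':
--             backslashes = 0
--             j = i - 1
--             while j >= 0 and json_str[j] == "\\":
--                 backslashes += 1
--                 j -= 1
--             if backslashes % 2 == 0:
--                 in_string = not in_string
--             out.append(ch)
--             i += 1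
--             continue
--         if in_string and ch == "\\" and i + 1 < len(json_str):
--             nxt = json_str[i + 1]
--             if nxt == " ":
--                 out.append(" ")
--                 i += 2
--                 continue
--             if nxt not in valid_escapes:
--                 out.append("\\\\")
--                 out.append(nxt)
--                 i += 2
--                 continue
--         out.append(ch)
--         i += 1
--     return "".join(out)
-- ===== SOURCE B (Python) =====
-- def _repair_invalid_json_escapes(json_str: str) -> str:
--     # Single pass: track the parity of the run of consecutive backslashes
--     # ending just before the current index, instead of rescanning backward
--     # at every quote.
--     valid_escapes = {'"', "\\", "/", "b", "f", "n", "r", "t", "u"}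
--     out = []
--     in_string = False
--     even = True   # parity of consecutive backslashes immediately before index i
--     skip = False  # the previous iteration already consumed this character
--     n = len(json_str)
--     for i in range(n):
--         ch = json_str[i]
--         if skip:
--             skip = False
--             even = True  # the consumed char is never a backslash
--             continue
--         if ch == '"':
--             if even:
--                 in_string = not in_string
--             out.append('"')
--             even = True
--             continue
--         if ch == "\\":
--             if in_string and i + 1 < n:
--                 nxt = json_str[i + 1]
--                 if nxt == " ":
--                     out.append(" ")
--                     skip = True
--                     continue
--                 if nxt not in valid_escapes:
--                     out.append("\\\\")
--                     out.append(nxt)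
--                     skip = True
--                     continue
--             out.append(ch)
--             even = not even
--             continue
--         out.append(ch)
--         even = True
--     return "".join(out)
-- ===== Notes on version B (the rewrite author's own statement) =====
-- stated objective: faster
-- what changed: Replaces A's backward rescan of all preceding backslashes at every quote with a single forward pass that maintains the running parity of the current consecutive-backslash run.
import Mathlib
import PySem

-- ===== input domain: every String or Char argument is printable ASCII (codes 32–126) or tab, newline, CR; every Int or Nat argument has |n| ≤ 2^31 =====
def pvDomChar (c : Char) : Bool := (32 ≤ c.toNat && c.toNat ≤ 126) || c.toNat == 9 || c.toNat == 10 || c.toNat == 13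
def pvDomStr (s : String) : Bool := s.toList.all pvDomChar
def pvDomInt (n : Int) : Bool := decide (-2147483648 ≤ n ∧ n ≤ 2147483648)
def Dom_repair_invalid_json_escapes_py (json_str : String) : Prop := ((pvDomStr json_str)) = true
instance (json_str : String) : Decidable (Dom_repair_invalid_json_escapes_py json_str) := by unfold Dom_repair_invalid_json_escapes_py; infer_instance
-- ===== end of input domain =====

-- B replaces A's O(n) backward backslash-rescan at every quote by a running
-- backslash-run-parity flag, giving one single pass (objective: faster).

-- ===== PORT A =====
-- the valid_escapes set literal (distinct elements)
def pvValidEsc : PySem.Set Char :=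
  PySem.Set.ofList ['"', '\\', '/', 'b', 'f', 'n', 'r', 't', 'u']

-- inner backward while-loop: number of consecutive '\\' at positions i-1, i-2, …
def pvBackCount (cs : List Char) : Nat → Nat
  | 0 => 0
  | i + 1 => if cs.getD i ' ' == '\\' then pvBackCount cs i + 1 else 0

-- the main while-loop of A
def pvLoopA (cs : List Char) (acc : List Char) (inStr : Bool) (i : Nat) : List Char :=
  if h : i < cs.length then
    let ch := cs.getD i ' '
    if ch == '"' then
      let backslashes := pvBackCount cs i
      let inStr' := if backslashes % 2 == 0 then !inStr else inStr
      pvLoopA cs (acc ++ [ch]) inStr' (i + 1)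
    else if inStr && ch == '\\' && decide (i + 1 < cs.length) then
      let nxt := cs.getD (i + 1) ' '
      if nxt == ' ' then
        pvLoopA cs (acc ++ [' ']) inStr (i + 2)
      else if !(pvValidEsc.contains nxt) then
        pvLoopA cs (acc ++ ['\\', '\\', nxt]) inStr (i + 2)
      else
        pvLoopA cs (acc ++ [ch]) inStr (i + 1)
    else
      pvLoopA cs (acc ++ [ch]) inStr (i + 1)
  else acc
termination_by cs.length - i
decreasing_by all_goals omega

def repair_invalid_json_escapes_py (json_str : String) : String :=
  String.mk (pvLoopA json_str.toList [] false 0)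

-- ===== PORT B =====
-- B's own valid_escapes set literal
def pvValidEscB : PySem.Set Char :=
  PySem.Set.ofList ['"', '\\', '/', 'b', 'f', 'n', 'r', 't', 'u']
-- loop body of B; state = (out, in_string, even, skip)
def pvStepB (cs : List Char) (st : List Char × Bool × Bool × Bool) (i : Nat) :
    List Char × Bool × Bool × Bool :=
  let (acc, inStr, even, skip) := st
  let ch := cs.getD i ' '
  if skip then (acc, inStr, true, false)
  else if ch == '"' then
    (acc ++ ['"'], (if even then !inStr else inStr), true, false)
  else if ch == '\\' then
    if inStr && decide (i + 1 < cs.length) then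
      let nxt := cs.getD (i + 1) ' '
      if nxt == ' ' then (acc ++ [' '], inStr, even, true)
      else if !(pvValidEscB.contains nxt) then (acc ++ ['\\', '\\', nxt], inStr, even, true)
      else (acc ++ [ch], inStr, !even, false)
    else (acc ++ [ch], inStr, !even, false)
  else (acc ++ [ch], inStr, true, false)

def repair_invalid_json_escapes_py_alt (json_str : String) : String :=
  let cs := json_str.toList
  String.mk ((List.foldl (pvStepB cs) ([], false, true, false) (List.range cs.length)).1)

-- ===== PRECONDITION & SPEC =====
def Spec_repair_invalid_json_escapes_py (json_str : String) (out : String) : Prop := out = repair_invalid_json_escapes_py_alt json_str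
instance (json_str : String) (out : String) : Decidable (Spec_repair_invalid_json_escapes_py json_str out) := by unfold Spec_repair_invalid_json_escapes_py; infer_instance

-- ===== CLAIM (what is proved, stated in full; the proofs are below) =====
def Claim_equal_repair_invalid_json_escapes_py : Prop := ∀ (json_str : String), Dom_repair_invalid_json_escapes_py json_str → Spec_repair_invalid_json_escapes_py json_str (repair_invalid_json_escapes_py json_str)

-- ===== LEMMAS AND PROOFS =====

-- the running flag maintained by B is exactly the parity A recomputes
lemma pvLoopA_eq_fold (cs : List Char) :
    ∀ k i acc inStr, cs.length - i = k →
    pvLoopA cs acc inStr i =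
      (List.foldl (pvStepB cs) (acc, inStr, pvBackCount cs i % 2 == 0, false)
        (List.range' i (cs.length - i))).1 := by
  intro k
  induction k using Nat.strong_induction_on with
  | _ k ih =>
    intro i acc inStr hk
    by_cases h : i < cs.length
    · have hci : cs.getD i ' ' = cs[i] := List.getD_eq_getElem cs ' ' h
      have hgi : cs[i]?.getD ' ' = cs[i] := by simp [List.getElem?_eq_getElem h]
      have hb1 : pvBackCount cs (i + 1) = if cs[i] == '\\' then pvBackCount cs i + 1 else 0 := by
        show (if cs.getD i ' ' == '\\' then pvBackCount cs i + 1 else 0) = _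
        rw [hci]
      rw [pvLoopA]
      simp only [h, dif_pos, hci]
      by_cases hq : cs[i] = '"'
      · -- quote branch
        have hr : cs.length - i = (cs.length - (i+1)) + 1 := by omega
        have h0 : pvBackCount cs (i+1) = 0 := by rw [hb1]; simp [hq]
        rw [hr, List.range'_succ, List.foldl_cons]
        simp [pvStepB, hci, hgi, hq]
        rw [ih (cs.length - (i+1)) (by omega) (i+1) _ _ rfl]
        simp [h0]
      · by_cases hbs : cs[i] = '\\'
        · by_cases hl : inStr = true ∧ i + 1 < cs.length
          · -- lookahead branches
            obtain ⟨hin, hlt⟩ := hl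
            have hci1 : cs.getD (i+1) ' ' = cs[i+1] := List.getD_eq_getElem cs ' ' hlt
            have hgi1 : cs[i+1]?.getD ' ' = cs[i+1] := by simp [List.getElem?_eq_getElem hlt]
            have hb2 : pvBackCount cs (i + 2) = if cs[i+1] == '\\' then pvBackCount cs (i+1) + 1 else 0 := by
              show (if cs.getD (i+1) ' ' == '\\' then pvBackCount cs (i+1) + 1 else 0) = _
              rw [hci1]
            by_cases hsp : cs[i+1] = ' '
            · have hr : cs.length - i = (cs.length - (i+2)) + 1 + 1 := by omega
              have h0 : pvBackCount cs (i+2) = 0 := by rw [hb2]; simp [hsp]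
              rw [hr, List.range'_succ, List.foldl_cons, List.range'_succ, List.foldl_cons]
              simp [pvStepB, hci, hgi, hci1, hgi1, hq, hbs, hin, hlt, hsp]
              rw [ih (cs.length - (i+2)) (by omega) (i+2) _ _ rfl]
              simp [h0]
            · by_cases hv : cs[i+1] ∈ pvValidEsc
              · -- valid escape: plain append, advance 1
                have hvB : (cs[i+1] ∈ pvValidEscB) = (cs[i+1] ∈ pvValidEsc) := rfl
                have hr : cs.length - i = (cs.length - (i+1)) + 1 := by omega
                have h1 : pvBackCount cs (i+1) = pvBackCount cs i + 1 := by rw [hb1]; simp [hbs]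
                have hpar : (pvBackCount cs (i+1) % 2 == 0) = !(pvBackCount cs i % 2 == 0) := by
                  rw [h1]
                  rcases Nat.mod_two_eq_zero_or_one (pvBackCount cs i) with he | he <;>
                    simp [Nat.add_mod, he]
                rw [hr, List.range'_succ, List.foldl_cons]
                simp [pvStepB, hci, hgi, hci1, hgi1, hq, hbs, hin, hlt, hsp, hvB, hv]
                rw [ih (cs.length - (i+1)) (by omega) (i+1) _ _ rfl]
                simp [hpar]
              · -- invalid escape: double the backslash, advance 2
                have hvB : (cs[i+1] ∈ pvValidEscB) = (cs[i+1] ∈ pvValidEsc) := rfl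
                have hnb : cs[i+1] ≠ '\\' := by
                  intro hc; apply hv; rw [hc]; decide
                have hr : cs.length - i = (cs.length - (i+2)) + 1 + 1 := by omega
                have h0 : pvBackCount cs (i+2) = 0 := by rw [hb2]; simp [hnb]
                rw [hr, List.range'_succ, List.foldl_cons, List.range'_succ, List.foldl_cons]
                simp [pvStepB, hci, hgi, hci1, hgi1, hq, hbs, hin, hlt, hsp, hvB, hv]
                rw [ih (cs.length - (i+2)) (by omega) (i+2) _ _ rfl]
                simp [h0]
          · -- backslash, no lookahead: plain append, parity flips
            have hr : cs.length - i = (cs.length - (i+1)) + 1 := by omega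
            have h1 : pvBackCount cs (i+1) = pvBackCount cs i + 1 := by rw [hb1]; simp [hbs]
            have hpar : (pvBackCount cs (i+1) % 2 == 0) = !(pvBackCount cs i % 2 == 0) := by
              rw [h1]
              rcases Nat.mod_two_eq_zero_or_one (pvBackCount cs i) with he | he <;>
                simp [Nat.add_mod, he]
            rw [hr, List.range'_succ, List.foldl_cons]
            rcases Bool.eq_false_or_eq_true inStr with h1s | h1s
            · have hlt' : ¬ (i + 1 < cs.length) := fun hlt2 => hl ⟨h1s, hlt2⟩
              simp [pvStepB, hci, hgi, hq, hbs, h1s, hlt']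
              rw [ih (cs.length - (i+1)) (by omega) (i+1) _ _ rfl]
              simp [hpar, h1s]
            · simp [pvStepB, hci, hgi, hq, hbs, h1s]
              rw [ih (cs.length - (i+1)) (by omega) (i+1) _ _ rfl]
              simp [hpar, h1s]
        · -- ordinary character
          have hr : cs.length - i = (cs.length - (i+1)) + 1 := by omega
          have h0 : pvBackCount cs (i+1) = 0 := by rw [hb1]; simp [hbs]
          rw [hr, List.range'_succ, List.foldl_cons]
          simp [pvStepB, hci, hgi, hq, hbs]
          rw [ih (cs.length - (i+1)) (by omega) (i+1) _ _ rfl]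
          simp [h0]
    · rw [pvLoopA]
      have : cs.length - i = 0 := by omega
      simp [h, this]

-- ===== VERDICT (by name: the statement is the Claim_ definition above) =====
theorem repair_invalid_json_escapes_py_spec : Claim_equal_repair_invalid_json_escapes_py := by
  intro s _
  unfold Spec_repair_invalid_json_escapes_py repair_invalid_json_escapes_py repair_invalid_json_escapes_py_alt
  rw [pvLoopA_eq_fold s.toList (s.toList.length - 0) 0 [] false rfl]
  simp [pvBackCount, List.range_eq_range']
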